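-- pv_equiv track=rewrite | github.com/maximShitik/Eight_Puzzle | heuristics.py | count_col_conflicts
-- ===== SOURCE A (Python) =====
-- def count_col_conflicts(state):
--     sum = 0
--     for col in range(3):
--         curr_col = []
--         for row in range(3):
--             tile = state[row][col]
--             if tile !=0:
--                 goal_col = tile % 3
--                 if col == goal_col:
--                     curr_col.append(tile)
--
--         for i in range(len(curr_col)):
--              for j in range(i+1, len(curr_col)):
--                if curr_col[i] > curr_col[j]:
--                   sum += 1
--     return sum
-- ===== SOURCE B (Python) =====
-- def count_col_conflicts(state):
--     # Bucket qualifying tiles by column in one row-major sweep, then count each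
--     # bucket's inversions as the number of swaps bubble sort makes sorting it.
--     buckets = [[], [], []]
--     for row in range(3):
--         for col in range(3):
--             t = state[row][col]
--             if t != 0 and t % 3 == col:
--                 buckets[col].append(t)
--     total = 0
--     for b in buckets:
--         for _ in range(len(b)):
--             for i in range(len(b) - 1):
--                 if b[i] > b[i + 1]:
--                     b[i], b[i + 1] = b[i + 1], b[i]
--                     total += 1
--     return total
-- ===== Notes on version B (the rewrite author's own statement) =====
-- stated objective: alternative
-- what changed: Replaces A's per-column filter-then-count-all-index-pairs passes by a single row-major sweep that buckets qualifying tiles per column and then counts each bucket's conflicts as the number of adjacent swaps bubble sort performs while sorting it (swap count = inversion count).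
import Mathlib
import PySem

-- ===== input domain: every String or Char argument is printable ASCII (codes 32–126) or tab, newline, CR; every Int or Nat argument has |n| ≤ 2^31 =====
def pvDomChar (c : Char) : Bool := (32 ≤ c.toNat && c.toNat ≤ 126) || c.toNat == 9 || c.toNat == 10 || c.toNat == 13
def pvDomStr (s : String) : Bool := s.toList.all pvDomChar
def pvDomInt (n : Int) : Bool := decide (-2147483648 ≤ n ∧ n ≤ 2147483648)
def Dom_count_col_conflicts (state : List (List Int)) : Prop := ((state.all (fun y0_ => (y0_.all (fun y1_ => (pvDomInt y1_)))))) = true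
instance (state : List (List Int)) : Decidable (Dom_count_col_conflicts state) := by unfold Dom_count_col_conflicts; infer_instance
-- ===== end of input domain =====

-- B replaces A's per-column filter + pairwise index-pair counting by a row-major bucketing
-- sweep plus counting the swaps bubble sort makes sorting each bucket (objective: alternative;
-- equivalence of the return value on states whose first 3 rows have length ≥ 3).


-- ===== PORT A =====
-- A-side helper: A's inversion-counting double index loop over curr_col, threading sum.
def aInv (curr_col : List Int) (sum : Int) : Int :=
  (PySem.List.pyRange 0 (curr_col.length : Int) 1).foldl (fun s i =>
    (PySem.List.pyRange (i + 1) (curr_col.length : Int) 1).foldl (fun s j =>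
      if PySem.List.pyGetD curr_col i 0 > PySem.List.pyGetD curr_col j 0 then s + 1 else s) s) sum

-- A-side helper: the body of A's 'for col in range(3)' loop (build curr_col, then count pairs).
-- state[row][col] is pyGetD with a default; Pre_ keeps both indexings in range, as in Python.
def aColBody (state : List (List Int)) (sum col : Int) : Int :=
  let curr_col := (PySem.List.pyRange 0 3 1).foldl (fun cc row =>
      let tile := PySem.List.pyGetD (PySem.List.pyGetD state row []) col 0
      if tile ≠ 0 then
        let goal_col := PySem.Int.mod tile 3
        if col = goal_col then cc ++ [tile] else cc
      else cc) []
  aInv curr_col sum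

def count_col_conflicts (state : List (List Int)) : Int :=
  (PySem.List.pyRange 0 3 1).foldl (aColBody state) 0

-- ===== PORT B =====
-- B-side helper: one bubble sweep over a bucket ('for i in range(len(b) - 1)'): adjacent
-- out-of-order tiles are swapped; returns the swept list and the number of swaps made.
def bSweep : List Int → List Int × Int
  | [] => ([], 0)
  | [a] => ([a], 0)
  | a :: b :: rest =>
    if a > b then
      let (r, c) := bSweep (a :: rest); (b :: r, c + 1)
    else
      let (r, c) := bSweep (b :: rest); (a :: r, c)

-- B-side helper: 'for _ in range(len(b))' bubble passes; returns the total swap count.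
def bSort (b : List Int) : Int :=
  ((PySem.List.pyRange 0 (b.length : Int) 1).foldl (fun (p : List Int × Int) _ =>
      let (r, c) := bSweep p.1; (r, p.2 + c)) (b, 0)).2

-- B-side helper: the row-major bucketing sweep ('buckets[col].append(t)').
def bBuckets (state : List (List Int)) : List (List Int) :=
  (PySem.List.pyRange 0 3 1).foldl (fun bs row =>
    (PySem.List.pyRange 0 3 1).foldl (fun bs col =>
      let t := PySem.List.pyGetD (PySem.List.pyGetD state row []) col 0
      if t ≠ 0 ∧ PySem.Int.mod t 3 = col then bs.modify col.toNat (· ++ [t]) else bs) bs)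
    [[], [], []]

def count_col_conflicts_alt (state : List (List Int)) : Int :=
  (bBuckets state).foldl (fun total b => total + bSort b) 0

-- ===== PRECONDITION & SPEC =====
-- A indexes state[row][col] for row, col in 0..2 and raises IndexError on shorter input.
def Pre_count_col_conflicts (state : List (List Int)) : Prop :=
  3 ≤ state.length ∧ ∀ r ∈ state.take 3, 3 ≤ r.length
instance (state : List (List Int)) : Decidable (Pre_count_col_conflicts state) := by
  unfold Pre_count_col_conflicts; infer_instance
def pvWitness_count_col_conflicts : List (List Int) := [[1, 2, 3], [4, 5, 6], [7, 8, 0]]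

def Spec_count_col_conflicts (state : List (List Int)) (out : Int) : Prop := out = count_col_conflicts_alt state
instance (state : List (List Int)) (out : Int) : Decidable (Spec_count_col_conflicts state out) := by unfold Spec_count_col_conflicts; infer_instance

-- ===== CLAIM (what is proved, stated in full; the proofs are below) =====
def Claim_equal_count_col_conflicts : Prop := ∀ (state : List (List Int)), Dom_count_col_conflicts state → Pre_count_col_conflicts state → Spec_count_col_conflicts state (count_col_conflicts state)

-- ===== LEMMAS AND PROOFS =====
-- the filtered column built from the three tiles of column col (both programs build this list)
def colFilt (col a b c : Int) : List Int :=
  (if a ≠ 0 ∧ PySem.Int.mod a 3 = col then [a] else []) ++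
  (if b ≠ 0 ∧ PySem.Int.mod b 3 = col then [b] else []) ++
  (if c ≠ 0 ∧ PySem.Int.mod c 3 = col then [c] else [])

-- aInv evaluated on lists of length 0..3 (the only lengths a column can produce).
theorem aInv_nil (s : Int) : aInv [] s = s := by
  simp [aInv, PySem.List.pyRange]

theorem aInv_one (a s : Int) : aInv [a] s = s := by
  norm_num [aInv, PySem.List.pyRange, List.range_succ]

theorem aInv_two (a b s : Int) : aInv [a, b] s = if b < a then s + 1 else s := by
  norm_num [aInv, PySem.List.pyRange, List.range_succ, PySem.List.pyGetD, PySem.List.pyIdx?,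
    PySem.List.pyGet?, List.foldl, show Int.toNat 2 = 2 from rfl, show Int.toNat 1 = 1 from rfl]

theorem aInv_three (a b c s : Int) :
    aInv [a, b, c] s =
      s + (if b < a then 1 else 0) + (if c < a then 1 else 0) + (if c < b then 1 else 0) := by
  norm_num [aInv, PySem.List.pyRange, List.range_succ, PySem.List.pyGetD, PySem.List.pyIdx?,
    PySem.List.pyGet?, List.foldl, show Int.toNat 3 = 3 from rfl, show Int.toNat 2 = 2 from rfl,
    show Int.toNat 1 = 1 from rfl]
  split_ifs <;> omega

-- bSweep on lists of length ≤ 3, written out.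
theorem bSweep_two (a b : Int) : bSweep [a, b] = if a > b then ([b, a], 1) else ([a, b], 0) := by
  simp [bSweep]

theorem bSweep_three (a b c : Int) :
    bSweep [a, b, c] =
      if a > b then (if a > c then ([b, c, a], 2) else ([b, a, c], 1))
      else if b > c then ([a, c, b], 1) else ([a, b, c], 0) := by
  simp only [bSweep]
  split_ifs <;> simp_all

-- bSort's swap count on lists of length 0..3.
theorem bSort_nil : bSort [] = 0 := by decide

theorem bSort_one (a : Int) : bSort [a] = 0 := by
  norm_num [bSort, bSweep, PySem.List.pyRange, List.range_succ]

theorem bSort_two (a b : Int) : bSort [a, b] = if b < a then 1 else 0 := by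
  have h2 : PySem.List.pyRange 0 ((2:Nat) : Int) 1 = [0, 1] := by decide
  simp only [bSort, List.length_cons, List.length_nil, h2, List.foldl]
  rw [bSweep_two]
  split_ifs <;> simp [bSweep_two] <;> split_ifs <;> omega

theorem bSort_three (a b c : Int) :
    bSort [a, b, c] =
      (if b < a then 1 else 0) + (if c < a then 1 else 0) + (if c < b then 1 else 0) := by
  have h3 : PySem.List.pyRange 0 ((3:Nat) : Int) 1 = [0, 1, 2] := by decide
  simp only [bSort, List.length_cons, List.length_nil, h3, List.foldl]
  rw [bSweep_three]
  split_ifs <;> simp [bSweep_three] <;> split_ifs <;> simp_all [bSweep_three] <;>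
    split_ifs <;> omega

-- A's per-tile branch pair rewritten as the single conjunction both colFilt and B test.
theorem tileIf (col t : Int) (cc : List Int) :
    (if t ≠ 0 then (if col = PySem.Int.mod t 3 then cc ++ [t] else cc) else cc) =
      (if t ≠ 0 ∧ PySem.Int.mod t 3 = col then cc ++ [t] else cc) := by
  split_ifs <;> simp_all

-- A's curr_col for column col is exactly the filtered column of its three tiles.
theorem aCol_list_eq (state : List (List Int)) (col : Int) :
    (PySem.List.pyRange 0 3 1).foldl (fun cc row =>
      let tile := PySem.List.pyGetD (PySem.List.pyGetD state row []) col 0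
      if tile ≠ 0 then
        let goal_col := PySem.Int.mod tile 3
        if col = goal_col then cc ++ [tile] else cc
      else cc) [] =
      colFilt col (PySem.List.pyGetD (PySem.List.pyGetD state 0 []) col 0)
                  (PySem.List.pyGetD (PySem.List.pyGetD state 1 []) col 0)
                  (PySem.List.pyGetD (PySem.List.pyGetD state 2 []) col 0) := by
  have hr : PySem.List.pyRange 0 3 1 = [0, 1, 2] := by decide
  simp only [hr, List.foldl, colFilt, tileIf]
  split_ifs <;> simp

theorem aColBody_eq (state : List (List Int)) (s col : Int) :
    aColBody state s col =
      aInv (colFilt col (PySem.List.pyGetD (PySem.List.pyGetD state 0 []) col 0)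
                        (PySem.List.pyGetD (PySem.List.pyGetD state 1 []) col 0)
                        (PySem.List.pyGetD (PySem.List.pyGetD state 2 []) col 0)) s := by
  simp only [aColBody]
  rw [aCol_list_eq]

-- conditional List.modify on a literal 3-list, componentwise.
theorem upd0 (C : Prop) [Decidable C] (f : List Int → List Int) (x y z : List Int) :
    (if C then ([x, y, z] : List (List Int)).modify 0 f else [x, y, z]) =
      [if C then f x else x, y, z] := by split_ifs <;> simp [List.modify]
theorem upd1 (C : Prop) [Decidable C] (f : List Int → List Int) (x y z : List Int) :
    (if C then ([x, y, z] : List (List Int)).modify 1 f else [x, y, z]) =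
      [x, if C then f y else y, z] := by split_ifs <;> simp [List.modify]
theorem upd2 (C : Prop) [Decidable C] (f : List Int → List Int) (x y z : List Int) :
    (if C then ([x, y, z] : List (List Int)).modify 2 f else [x, y, z]) =
      [x, y, if C then f z else z] := by split_ifs <;> simp [List.modify]

-- the nested append chain a bucket accumulates equals colFilt of its three tiles.
theorem chain_eq (col a b c : Int) :
    (if c ≠ 0 ∧ PySem.Int.mod c 3 = col then
        (if b ≠ 0 ∧ PySem.Int.mod b 3 = col then
            (if a ≠ 0 ∧ PySem.Int.mod a 3 = col then ([] : List Int) ++ [a] else []) ++ [b]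
          else (if a ≠ 0 ∧ PySem.Int.mod a 3 = col then ([] : List Int) ++ [a] else [])) ++ [c]
      else
        (if b ≠ 0 ∧ PySem.Int.mod b 3 = col then
            (if a ≠ 0 ∧ PySem.Int.mod a 3 = col then ([] : List Int) ++ [a] else []) ++ [b]
          else (if a ≠ 0 ∧ PySem.Int.mod a 3 = col then ([] : List Int) ++ [a] else []))) =
      colFilt col a b c := by
  unfold colFilt; split_ifs <;> simp

-- B's buckets are exactly the three filtered columns.
theorem bBuckets_eq (state : List (List Int)) :
    bBuckets state =
      [colFilt 0 (PySem.List.pyGetD (PySem.List.pyGetD state 0 []) 0 0)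
                 (PySem.List.pyGetD (PySem.List.pyGetD state 1 []) 0 0)
                 (PySem.List.pyGetD (PySem.List.pyGetD state 2 []) 0 0),
       colFilt 1 (PySem.List.pyGetD (PySem.List.pyGetD state 0 []) 1 0)
                 (PySem.List.pyGetD (PySem.List.pyGetD state 1 []) 1 0)
                 (PySem.List.pyGetD (PySem.List.pyGetD state 2 []) 1 0),
       colFilt 2 (PySem.List.pyGetD (PySem.List.pyGetD state 0 []) 2 0)
                 (PySem.List.pyGetD (PySem.List.pyGetD state 1 []) 2 0)
                 (PySem.List.pyGetD (PySem.List.pyGetD state 2 []) 2 0)] := by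
  have hr : PySem.List.pyRange 0 3 1 = [0, 1, 2] := by decide
  simp only [bBuckets, hr, List.foldl,
    show ((0:Int).toNat) = 0 from rfl, show ((1:Int).toNat) = 1 from rfl,
    show ((2:Int).toNat) = 2 from rfl, upd0, upd1, upd2]
  rw [chain_eq, chain_eq, chain_eq]

-- A's pairwise inversion count equals B's bubble-sort swap count on a filtered column,
-- threading A's running sum.
theorem inv_eq_swaps (col a b c s : Int) :
    aInv (colFilt col a b c) s = s + bSort (colFilt col a b c) := by
  unfold colFilt
  split_ifs <;>
    simp only [List.nil_append, List.cons_append, List.append_nil,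
      aInv_nil, aInv_one, aInv_two, aInv_three,
      bSort_nil, bSort_one, bSort_two, bSort_three] <;> (try split_ifs) <;> omega

theorem count_col_conflicts_eq_alt (state : List (List Int)) :
    count_col_conflicts state = count_col_conflicts_alt state := by
  have hr : PySem.List.pyRange 0 3 1 = [0, 1, 2] := by decide
  simp only [count_col_conflicts, count_col_conflicts_alt, hr, bBuckets_eq, List.foldl,
    aColBody_eq, inv_eq_swaps]

-- ===== VERDICT (by name: the statement is the Claim_ definition above) =====
theorem count_col_conflicts_spec : Claim_equal_count_col_conflicts := by
  intro state _ _
  exact count_col_conflicts_eq_alt state
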